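-- pv_equiv track=rewrite | github.com/myen015/Algorithm1_2025 | exo_1.py | binary_search_sparse
-- ===== SOURCE A (Python) =====
-- from typing import List
--
-- def binary_search_sparse(v: List[int], start: int, end: int) -> int:
--     """Binary divide and conquer to find single 1 in sparse vector"""
--     if start >= end:
--         return -1
--     if end - start == 1:
--         return start if v[start] == 1 else -1
--
--     mid = (start + end) // 2
--     left_result = binary_search_sparse(v, start, mid)
--     if left_result != -1:
--         return left_result
--     return binary_search_sparse(v, mid, end)
-- ===== SOURCE B (Python) =====
-- from typing import List
--
-- def binary_search_sparse(v: List[int], start: int, end: int) -> int: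
--     """Linear forward scan: return the index of the first 1 in v[start:end], else -1."""
--     for i in range(start, end):
--         if v[i] == 1:
--             return i
--     return -1
-- ===== Notes on version B (the rewrite author's own statement) =====
-- stated objective: simpler
-- what changed: Replaces the divide-and-conquer recursion (midpoint split, left half first, -1 sentinel propagation) by a single iterative forward scan over range(start, end) returning the first index holding 1.
-- outside the precondition, e.g. on binary_search_sparse([1], -1, 1): A returns 0, B returns -1
import Mathlib
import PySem

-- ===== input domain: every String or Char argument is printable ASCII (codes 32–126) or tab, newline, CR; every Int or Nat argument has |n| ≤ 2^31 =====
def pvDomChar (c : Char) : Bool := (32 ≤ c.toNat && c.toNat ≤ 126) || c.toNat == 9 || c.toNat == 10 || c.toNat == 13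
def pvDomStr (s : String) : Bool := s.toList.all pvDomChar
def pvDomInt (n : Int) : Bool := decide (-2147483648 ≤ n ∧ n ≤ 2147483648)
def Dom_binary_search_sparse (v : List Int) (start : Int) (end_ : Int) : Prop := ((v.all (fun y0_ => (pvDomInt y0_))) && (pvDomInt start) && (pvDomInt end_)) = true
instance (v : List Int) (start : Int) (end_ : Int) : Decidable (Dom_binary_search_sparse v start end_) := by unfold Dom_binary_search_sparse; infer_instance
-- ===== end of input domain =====

-- B replaces A's divide-and-conquer recursion by a plain iterative forward scan (simpler: no midpoint, no sentinel propagation).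

-- ===== PORT A =====
-- literal transliteration of A's divide-and-conquer; the Nat fuel (initially (end-start).toNat,
-- always sufficient) only makes the recursion structural, it never alters a computed value
def pvArec (v : List Int) : Nat → Int → Int → Int
  | 0, _, _ => -1        -- reached only with end_ ≤ start (empty range): `return -1`
  | fuel + 1, start, end_ =>
    if end_ ≤ start then -1
    else if end_ - start = 1 then
      -- `return start if v[start] == 1 else -1`; on `none` Python raises IndexError (excluded by Pre_)
      match PySem.List.pyGet? v start with
      | some x => if x = 1 then start else -1
      | none => -1
    else
      let mid := PySem.Int.floordiv (start + end_) 2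
      let left_result := pvArec v fuel start mid
      if left_result ≠ -1 then left_result
      else pvArec v fuel mid end_

def binary_search_sparse (v : List Int) (start : Int) (end_ : Int) : Int :=
  pvArec v (end_ - start).toNat start end_

-- ===== PORT B =====
-- `for i in range(start, end): if v[i] == 1: return i` / `return -1`
def pvScan (v : List Int) : List Int → Int
  | [] => -1
  | i :: rest => if PySem.List.pyGet? v i = some 1 then i else pvScan v rest

def binary_search_sparse_alt (v : List Int) (start : Int) (end_ : Int) : Int :=
  pvScan v (PySem.List.pyRange start end_ 1)

-- ===== PRECONDITION & SPEC =====
-- Pre_ restricts to the function's natural domain: the range [start, end) is empty, or start is a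
-- nonnegative index and the forward scan cannot run off the right end (end ≤ len(v), or a 1 occurs
-- in v[start:] and stops the scan first — otherwise A raises IndexError).  Non-empty ranges with a
-- negative start are excluded: there Python's negative-index wraparound is outside the intended
-- range-of-indices semantics and makes a found index collide with the -1 not-found sentinel.
def Pre_binary_search_sparse (v : List Int) (start : Int) (end_ : Int) : Prop :=
  end_ ≤ start ∨
    (0 ≤ start ∧ (end_ ≤ (v.length : Int) ∨ (1:Int) ∈ PySem.List.slice v (some start) none))
instance (v : List Int) (start : Int) (end_ : Int) : Decidable (Pre_binary_search_sparse v start end_) := by unfold Pre_binary_search_sparse; infer_instance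

def pvWitness_binary_search_sparse : List Int × Int × Int := ([1, 0], 0, 2)

def Spec_binary_search_sparse (v : List Int) (start : Int) (end_ : Int) (out : Int) : Prop := out = binary_search_sparse_alt v start end_
instance (v : List Int) (start : Int) (end_ : Int) (out : Int) : Decidable (Spec_binary_search_sparse v start end_ out) := by unfold Spec_binary_search_sparse; infer_instance

-- ===== CLAIM (what is proved, stated in full; the proofs are below) =====
def Claim_equal_binary_search_sparse : Prop := ∀ (v : List Int) (start : Int) (end_ : Int), Dom_binary_search_sparse v start end_ → Pre_binary_search_sparse v start end_ → Spec_binary_search_sparse v start end_ (binary_search_sparse v start end_)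

-- ===== LEMMAS AND PROOFS =====

-- first probe index that holds a 1 AND is not -1 (A's effective rule), else -1
def pvFindA (v : List Int) (l : List Int) : Int :=
  ((l.find? (fun i => (PySem.List.pyGet? v i == some 1) && (i != -1))).getD (-1))

-- first probe index that holds a 1 (B's rule), else -1
def pvFindB (v : List Int) (l : List Int) : Int :=
  ((l.find? (fun i => PySem.List.pyGet? v i == some 1)).getD (-1))

lemma pvScan_eq_findB (v : List Int) (l : List Int) : pvScan v l = pvFindB v l := by
  induction l with
  | nil => rfl
  | cons i rest ih =>
    by_cases h : PySem.List.pyGet? v i = some 1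
    · simp [pvScan, pvFindB, h]
    · simp only [pvScan, if_neg h, ih, pvFindB, List.find?_cons]
      have h' : (PySem.List.pyGet? v i == some 1) = false := by simp [h]
      rw [h']

-- general find?: predicates that agree on the list find the same element
lemma pvFind?_congr {p q : Int → Bool} (l : List Int) (h : ∀ x ∈ l, p x = q x) :
    l.find? p = l.find? q := by
  induction l with
  | nil => rfl
  | cons a rest ih =>
    have ha := h a (by simp)
    simp only [List.find?_cons, ← ha]
    cases hpa : p a
    · exact ih (fun x hx => h x (by simp [hx]))
    · rfl

lemma pvFindA_append (v l1 l2 : List Int) :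
    pvFindA v (l1 ++ l2) = if pvFindA v l1 ≠ -1 then pvFindA v l1 else pvFindA v l2 := by
  unfold pvFindA
  rw [List.find?_append]
  cases hf : List.find? (fun i => (PySem.List.pyGet? v i == some 1) && (i != -1)) l1 with
  | none => simp
  | some j =>
    have hj := List.find?_some hf
    have hj1 : j ≠ -1 := by
      by_contra hc
      simp [hc] at hj
    simp [hj1]

lemma pvArec_eq_findA (v : List Int) (n : Nat) (s e : Int) (hn : (e - s).toNat ≤ n) :
    pvArec v n s e = pvFindA v (PySem.List.pyRange s e 1) := by
  induction n generalizing s e with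
  | zero =>
    have h1 : e ≤ s := by omega
    simp [pvArec, PySem.List.pyRange_one_eq_nil h1, pvFindA]
  | succ n ih =>
    by_cases h1 : e ≤ s
    · simp [pvArec, h1, PySem.List.pyRange_one_eq_nil h1, pvFindA]
    · by_cases h2 : e - s = 1
      · have he : e = s + 1 := by omega
        subst he
        rw [PySem.List.pyRange_one_singleton]
        simp only [pvArec, h2, if_neg h1]
        cases hg : PySem.List.pyGet? v s with
        | none => simp [pvFindA, List.find?, hg]
        | some x =>
          by_cases hx : x = 1
          · subst hx
            by_cases hs1 : s = -1
            · subst hs1; simp [pvFindA, List.find?, hg]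
            · have h' : (s != -1) = true := by simp [hs1]
              simp [pvFindA, List.find?, hg, h']
          · have h' : (x == 1) = false := by simp [hx]
            simp [pvFindA, List.find?, hg, h']
            exact fun hc => absurd hc hx
      · have h2' : 0 < (2:Int) := by omega
        have hmid : PySem.Int.floordiv (s + e) 2 = (s + e) / 2 :=
          PySem.Int.floordiv_eq_ediv_of_pos h2'
        have hsm : s ≤ (s + e) / 2 := by omega
        have hme : (s + e) / 2 ≤ e := by omega
        simp only [pvArec, if_neg h1, if_neg h2, hmid]
        rw [ih s ((s + e) / 2) (by omega), ih ((s + e) / 2) e (by omega),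
          PySem.List.pyRange_one_append s ((s + e) / 2) e hsm hme,
          pvFindA_append]

lemma A_eq_findA (v : List Int) (s e : Int) :
    binary_search_sparse v s e = pvFindA v (PySem.List.pyRange s e 1) := by
  exact pvArec_eq_findA v _ s e le_rfl

theorem binary_search_sparse_spec : Claim_equal_binary_search_sparse := by
  intro v s e _ hpre
  unfold Spec_binary_search_sparse
  rw [A_eq_findA]
  unfold binary_search_sparse_alt
  rw [pvScan_eq_findB]
  unfold pvFindA pvFindB
  by_cases h1 : e ≤ s
  · rw [PySem.List.pyRange_one_eq_nil h1]; rfl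
  · -- Pre_ gives 0 ≤ s, so every probed index is nonnegative and never collides with -1
    have hs0 : 0 ≤ s := by
      rcases hpre with h | h
      · omega
      · exact h.1
    rw [pvFind?_congr (PySem.List.pyRange s e 1) (fun x hx => ?_)]
    have hx' := PySem.List.mem_pyRange_one.mp hx
    have : x ≠ -1 := by omega
    simp [this]
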